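-- pv_equiv track=rewrite | github.com/GuilhermeTyszka/TopCoderSafra | Módulo 2/Notebooks/projeto_teste.py | lista_combinacoes
-- ===== SOURCE A (Python) =====
-- def lista_combinacoes(lista: list) -> list:
--     ''' Recebe uma lista de listas e retorna todas os arranjos de escolhas de um elemento de cada lista.
--     Exemplos: lista_combinacoes([[1, 2], [3, 4, 5]]) --> [[1, 3], [1, 4], [1, 5], [2, 3], [2, 4], [2, 5]]
--     '''
--     if len(lista) == 0:
--         return [[]]
--     combinacoes = [[]]
--     for i in range(len(lista)):
--         combinacoes = [y + [x] for x in lista[i] for y in combinacoes]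
--     # retira as listas com elementos repetidos
--     arranjo = [i for i in combinacoes if len(set(i)) == len(lista)]
--     return arranjo
-- ===== SOURCE B (Python) =====
-- def lista_combinacoes(lista: list) -> list:
--     ''' Recebe uma lista de listas e retorna todas os arranjos de escolhas de um elemento de cada lista.
--     Backtracking from the last list to the first, pruning repeated elements early,
--     emitting in the same order as the naive product+filter version.
--     '''
--     out = []
--
--     def bt(i, suffix, used):
--         if i < 0:
--             out.append(suffix)
--             return
--         for x in lista[i]:
--             if x not in used:
--                 used.add(x)
--                 bt(i - 1, [x] + suffix, used)
--                 used.discard(x)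
--
--     bt(len(lista) - 1, [], set())
--     return out
-- ===== Notes on version B (the rewrite author's own statement) =====
-- stated objective: faster
-- what changed: Replaces the full Cartesian-product build followed by a distinctness filter with a backtracking enumeration (from the last list to the first, maintaining a 'used' set) that prunes arrangements containing a repeated element as soon as the repeat is chosen, emitting results in the same order.
import Mathlib
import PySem

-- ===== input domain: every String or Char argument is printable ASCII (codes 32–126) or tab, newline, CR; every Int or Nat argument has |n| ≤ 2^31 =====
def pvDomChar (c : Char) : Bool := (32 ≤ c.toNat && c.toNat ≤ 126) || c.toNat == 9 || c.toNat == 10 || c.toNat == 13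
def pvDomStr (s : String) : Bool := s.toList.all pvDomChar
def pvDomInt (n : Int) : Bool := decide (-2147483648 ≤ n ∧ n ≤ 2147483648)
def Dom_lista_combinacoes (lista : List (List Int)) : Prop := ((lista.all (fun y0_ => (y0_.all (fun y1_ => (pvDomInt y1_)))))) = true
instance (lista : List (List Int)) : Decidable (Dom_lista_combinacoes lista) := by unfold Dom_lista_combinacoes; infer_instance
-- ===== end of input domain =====

-- B replaces the build-everything-then-filter product with duplicate-pruning backtracking
-- (objective: faster — prunes arrangements with repeated elements as soon as the repeat is chosen).

-- ===== PORT A =====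
-- one pass of 'combinacoes = [y + [x] for x in lista[i] for y in combinacoes]'
def pvStepA (comb : List (List Int)) (li : List Int) : List (List Int) :=
  li.flatMap (fun x => comb.map (fun y => y ++ [x]))

def lista_combinacoes (lista : List (List Int)) : List (List Int) :=
  if lista.length = 0 then [[]]
  else
    let combinacoes := lista.foldl pvStepA [[]]
    combinacoes.filter (fun i => decide ((PySem.Set.ofList i).length = lista.length))

-- ===== PORT B =====
-- backtracking over the lists from the last to the first, pruning elements already used
def pvBt (rev : List (List Int)) (suffix : List Int) (used : PySem.Set Int) : List (List Int) :=
  match rev with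
  | [] => [suffix]
  | l :: rest =>
      l.foldl (fun acc x =>
        if PySem.Set.contains used x then acc
        else acc ++ pvBt rest (x :: suffix) (PySem.Set.add used x)) []

def lista_combinacoes_alt (lista : List (List Int)) : List (List Int) :=
  pvBt lista.reverse [] PySem.Set.empty

-- ===== PRECONDITION & SPEC =====
def Spec_lista_combinacoes (lista : List (List Int)) (out : List (List Int)) : Prop := out = lista_combinacoes_alt lista
instance (lista : List (List Int)) (out : List (List Int)) : Decidable (Spec_lista_combinacoes lista out) := by unfold Spec_lista_combinacoes; infer_instance

-- ===== CLAIM (what is proved, stated in full; the proofs are below) =====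
def Claim_equal_lista_combinacoes : Prop := ∀ (lista : List (List Int)), Dom_lista_combinacoes lista → Spec_lista_combinacoes lista (lista_combinacoes lista)

-- ===== LEMMAS AND PROOFS =====

-- the product, built by recursion on the REVERSED list of lists
def pvF : List (List Int) → List (List Int)
  | [] => [[]]
  | l :: r => l.flatMap (fun x => (pvF r).map (fun y => y ++ [x]))

theorem pvFoldA_eq_F (R : List (List Int)) :
    R.reverse.foldl pvStepA [[]] = pvF R := by
  induction R with
  | nil => rfl
  | cons l r ih =>
      simp [List.reverse_cons, List.foldl_append, ih, pvStepA, pvF]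

theorem pvF_length {R : List (List Int)} {w : List Int} (hw : w ∈ pvF R) :
    w.length = R.length := by
  induction R generalizing w with
  | nil => simp [pvF] at hw; simp [hw]
  | cons l r ih =>
      simp only [pvF, List.mem_flatMap, List.mem_map] at hw
      obtain ⟨x, _, y, hy, rfl⟩ := hw
      simp [ih hy]

theorem pvSetLen_eq_iff (w : List Int) :
    List.length (PySem.Set.ofList w) = w.length ↔ w.Nodup := by
  have hperm : List.Perm (PySem.Set.ofList w : List Int) w.dedup := by
    rw [List.perm_ext_iff_of_nodup (PySem.Set.nodup_ofList w) w.nodup_dedup]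
    intro a; simp [PySem.Set.mem_ofList, List.mem_dedup]
  rw [hperm.length_eq]
  constructor
  · intro h
    exact List.dedup_eq_self.mp ((w.dedup_sublist).eq_of_length h)
  · intro h; rw [List.dedup_eq_self.mpr h]

theorem pvFoldl_if_append {α β : Type} (p : α → Bool) (g : α → List β)
    (l : List α) (acc : List β) :
    l.foldl (fun acc x => if p x then acc else acc ++ g x) acc
      = acc ++ (l.filter (fun x => !p x)).flatMap g := by
  induction l generalizing acc with
  | nil => simp
  | cons a l ih =>
      cases hp : p a <;> simp [hp, ih, List.append_assoc]

theorem pvFlatMap_congr {α β : Type} {f g : α → List β} {l : List α}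
    (h : ∀ a ∈ l, f a = g a) : l.flatMap f = l.flatMap g := by
  induction l with
  | nil => rfl
  | cons a l ih =>
      simp [List.flatMap_cons, h a (by simp), ih (fun a ha => h a (by simp [ha]))]

theorem pvFilter_flatMap_eq {α β : Type} (p : α → Bool) (f : α → List β) (l : List α)
    (h : ∀ x ∈ l, p x = false → f x = []) :
    (l.filter p).flatMap f = l.flatMap f := by
  induction l with
  | nil => rfl
  | cons a l ih =>
      have ih' := ih (fun x hx => h x (by simp [hx]))
      cases hp : p a
      · simp [hp, ih', h a (by simp) hp]
      · simp [hp, ih']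

-- main invariant for the backtracking
theorem pvBt_eq (R : List (List Int)) (suffix : List Int) (used : List Int) :
    pvBt R suffix used
      = ((pvF R).filter (fun y => decide (y.Nodup ∧ ∀ a ∈ y, a ∉ used))).map
          (fun y => y ++ suffix) := by
  induction R generalizing suffix used with
  | nil => simp [pvBt, pvF, List.filter, List.nodup_nil]
  | cons l rest ih =>
      rw [pvBt, pvFoldl_if_append]
      simp only [List.nil_append]
      have hF : pvF (l :: rest) = l.flatMap (fun x => (pvF rest).map (fun y => y ++ [x])) := rfl
      rw [hF, List.filter_flatMap, List.map_flatMap]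
      rw [← pvFilter_flatMap_eq (fun x => !PySem.Set.contains used x)
            (fun x => (((pvF rest).map (fun y => y ++ [x])).filter
                (fun y => decide (y.Nodup ∧ ∀ a ∈ y, a ∉ used))).map (fun y => y ++ suffix)) l
            ?hnil]
      case hnil =>
        intro x hx hpx
        beta_reduce at hpx ⊢
        have hxu : x ∈ used := by
          have hpx' : PySem.Set.contains used x = true := by
            cases hc : PySem.Set.contains used x
            · exfalso; rw [hc] at hpx; exact absurd hpx (by simp)
            · rfl
          exact (PySem.Set.contains_iff used x).mp hpx'
        have : ((pvF rest).map (fun y => y ++ [x])).filter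
            (fun y => decide (y.Nodup ∧ ∀ a ∈ y, a ∉ used)) = [] := by
          rw [List.filter_eq_nil_iff]
          intro z hz
          simp only [List.mem_map] at hz
          obtain ⟨y, _, rfl⟩ := hz
          intro hcond
          have h2 := of_decide_eq_true hcond
          exact h2.2 x (by simp) hxu
        rw [this]; rfl
      apply pvFlatMap_congr
      intro x hx
      beta_reduce
      have hxu : x ∉ used := by
        have hp := List.of_mem_filter hx
        beta_reduce at hp
        intro hmem
        rw [(by simp [hmem] : PySem.Set.contains used x = true)] at hp
        simp at hp
      rw [ih]
      rw [List.filter_map, List.map_map]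
      have hfun : ((fun y => y ++ suffix) ∘ fun y => y ++ [x]) = (fun y : List Int => y ++ x :: suffix) := by
        funext y; simp [Function.comp, List.append_assoc]
      rw [hfun]
      have hfil : List.filter ((fun y => decide (y.Nodup ∧ ∀ a ∈ y, a ∉ used)) ∘ fun y => y ++ [x]) (pvF rest)
          = List.filter (fun y => decide (y.Nodup ∧ ∀ a ∈ y, a ∉ PySem.Set.add used x)) (pvF rest) := by
        apply List.filter_congr
        intro y hy
        simp only [Function.comp, decide_eq_decide]
        constructor
        · rintro ⟨hnd, hall⟩
          have hyn : y.Nodup := (List.nodup_append.mp hnd).1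
          have hxy : x ∉ y := by
            intro hxy
            rcases List.nodup_append.mp hnd with ⟨-, -, hdisj⟩
            exact hdisj x hxy x (by simp) rfl
          refine ⟨hyn, ?_⟩
          intro a ha hmem
          rcases (PySem.Set.mem_add used x a).mp hmem with h | rfl
          · exact hall a (List.mem_append_left _ ha) h
          · exact hxy ha
        · rintro ⟨hnd, hall⟩
          have hxy : x ∉ y := by
            intro hxy
            exact hall x hxy ((PySem.Set.mem_add used x x).mpr (Or.inr rfl))
          constructor
          · rw [List.nodup_append]
            refine ⟨hnd, List.nodup_singleton x, ?_⟩
            intro a ha b hb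
            have hb' : b = x := by simpa using hb
            subst hb'
            intro hab; exact hxy (hab ▸ ha)
          · intro a ha
            rcases List.mem_append.mp ha with h | h
            · intro hmem
              exact hall a h ((PySem.Set.mem_add used x a).mpr (Or.inl hmem))
            · have h' : a = x := by simpa using h
              exact h' ▸ hxu
      rw [hfil]

-- the two ports agree
theorem pvMain (lista : List (List Int)) :
    lista_combinacoes lista = lista_combinacoes_alt lista := by
  have hB : lista_combinacoes_alt lista
      = (pvF lista.reverse).filter (fun y => decide y.Nodup) := by
    unfold lista_combinacoes_alt
    rw [show (PySem.Set.empty : PySem.Set Int) = ([] : List Int) from rfl, pvBt_eq]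
    simp
  cases lista with
  | nil => rw [hB]; rfl
  | cons l0 t =>
      rw [hB]
      unfold lista_combinacoes
      rw [if_neg (by simp)]
      have hA : (l0 :: t).foldl pvStepA [[]] = pvF (l0 :: t).reverse := by
        have h := pvFoldA_eq_F (l0 :: t).reverse
        rwa [List.reverse_reverse] at h
      rw [hA]
      apply List.filter_congr
      intro w hw
      have hl : w.length = (l0 :: t).length := by
        have := pvF_length hw
        rwa [List.length_reverse] at this
      simp only [decide_eq_decide]
      rw [← hl]
      exact pvSetLen_eq_iff w

-- ===== VERDICT (by name: the statement is the Claim_ definition above) =====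
theorem lista_combinacoes_spec : Claim_equal_lista_combinacoes := by
  intro lista _
  unfold Spec_lista_combinacoes
  exact pvMain lista
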